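-- pv_equiv track=rewrite | github.com/ggako/projectEuler | for-checking/problem5.py | condenseDivisibleList
-- ===== SOURCE A (Python) =====
-- def condenseDivisibleList(list):
--     """
--     Removes list items for numbers already divisible by another
--
--     e.g. if a number is divisible by 20 , no need to check if a number is divisible by 1,2,3,4,5,10
--
--     e.g. [1, 2, 3, 4, 5, 6, 7, 8, 9, 10, 11, 12, 13, 14, 15, 16, 17, 18, 19, 20] is condensed into
--     [11, 12, 13, 14, 15, 16, 17, 18, 19, 20]
--     """
--
--     # Create a copy of list to avoid mutation of original list
--     listCopy = list.copy()
--
--     # Create a reverse sorted copy of list to avoid mutation of original list (will start checking at the largest number)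
--     listCopySorted = sorted(list, reverse=True)
--
--     # Loop throughout list and check if a larger number is divisible by that number which should be omitted in listCopy
--     for number in list:
--
--         # Loop each number in reverse sorted list and check for divisibility
--         for largerNumber in listCopySorted:
--
--             # Stops checking further the sorted list when largerNumber is now the same as number
--             if largerNumber == number:
--                 break
--
--             # Removes if detected divisibility
--             if largerNumber % number == 0:
--                 if number in listCopy:
--                     listCopy.remove(number)
--
--     # Return condensed version of list
--     return listCopy
-- ===== SOURCE B (Python) =====
-- def condenseDivisibleList(list):
--     # One filtering pass over the distinct values: keep x unless some strictly
--     # larger element of the list is an exact multiple of x.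
--     values = set(list)
--     return [x for x in list
--             if not any(x != 0 and y > x and y % x == 0 for y in values)]
-- ===== Notes on version B (the rewrite author's own statement) =====
-- stated objective: simpler
-- what changed: B replaces A's destructive nested scan (reverse-sorted copy, break at equality, repeated list.remove) by a single filtering comprehension over a set of the distinct values: keep x iff no strictly larger element is an exact multiple of x.
import Mathlib
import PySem

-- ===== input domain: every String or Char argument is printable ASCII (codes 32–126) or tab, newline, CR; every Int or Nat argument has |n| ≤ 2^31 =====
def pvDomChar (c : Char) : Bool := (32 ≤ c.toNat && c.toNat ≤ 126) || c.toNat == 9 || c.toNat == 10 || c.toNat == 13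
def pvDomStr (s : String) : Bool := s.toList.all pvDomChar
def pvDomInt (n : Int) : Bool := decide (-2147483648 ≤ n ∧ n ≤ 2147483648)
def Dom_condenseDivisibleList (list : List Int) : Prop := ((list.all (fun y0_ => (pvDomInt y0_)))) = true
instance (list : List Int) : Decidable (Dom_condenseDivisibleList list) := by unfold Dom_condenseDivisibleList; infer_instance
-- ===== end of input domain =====

-- ===== PORT A =====
-- B replaces A's destructive nested scan by one filtering pass; equal wherever A returns (Pre_ excludes only A's ZeroDivisionError inputs).
-- inner 'for largerNumber in listCopySorted' loop of A, with its break and conditional remove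
def pvInnerA (number : Int) : List Int → List Int → List Int
  | copy, [] => copy
  | copy, largerNumber :: rest =>
    if largerNumber = number then copy
    else if PySem.Int.mod largerNumber number = 0 then
      pvInnerA number
        (if number ∈ copy then (PySem.List.remove? copy number).getD copy else copy) rest
    else pvInnerA number copy rest

def condenseDivisibleList (list : List Int) : List Int :=
  let listCopy := list
  let listCopySorted := PySem.List.sorted list (fun x => x) true
  list.foldl (fun copy number => pvInnerA number copy listCopySorted) listCopy

-- ===== PORT B =====
def condenseDivisibleList_alt (list : List Int) : List Int :=
  let values : PySem.Set Int := PySem.Set.ofList list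
  list.filter (fun x =>
    !(values.any (fun y => decide (x ≠ 0) && decide (y > x) && decide (PySem.Int.mod y x = 0))))

-- ===== PRECONDITION & SPEC =====
-- Pre_ excludes exactly the inputs on which A raises ZeroDivisionError: a 0 together with a positive element.
def Pre_condenseDivisibleList (list : List Int) : Prop :=
  ¬ ((0 : Int) ∈ list ∧ ∃ y ∈ list, 0 < y)
instance (list : List Int) : Decidable (Pre_condenseDivisibleList list) := by
  unfold Pre_condenseDivisibleList; infer_instance
def pvWitness_condenseDivisibleList : List Int := [2, 3, 4, 12]

def Spec_condenseDivisibleList (list : List Int) (out : List Int) : Prop := out = condenseDivisibleList_alt list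
instance (list : List Int) (out : List Int) : Decidable (Spec_condenseDivisibleList list out) := by unfold Spec_condenseDivisibleList; infer_instance

-- ===== CLAIM (what is proved, stated in full; the proofs are below) =====
def Claim_equal_condenseDivisibleList : Prop := ∀ (list : List Int), Dom_condenseDivisibleList list → Pre_condenseDivisibleList list → Spec_condenseDivisibleList list (condenseDivisibleList list)

-- ===== LEMMAS AND PROOFS =====

-- number of divisible elements A's inner loop sees before its break
def pvK (v : Int) : List Int → Nat
  | [] => 0
  | l :: r => if l = v then 0 else (if PySem.Int.mod l v = 0 then 1 else 0) + pvK v r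

theorem pvStep_eq_erase (copy : List Int) (v : Int) :
    (if v ∈ copy then (PySem.List.remove? copy v).getD copy else copy) = copy.erase v := by
  by_cases h : v ∈ copy
  · simp [h, PySem.List.remove?_eq_some_erase _ _ h]
  · simp [h, List.erase_of_not_mem h]

theorem pvInnerA_sublist (v : Int) (sd copy : List Int) :
    (pvInnerA v copy sd).Sublist copy := by
  induction sd generalizing copy with
  | nil => exact List.Sublist.refl _
  | cons l r ih =>
    simp only [pvInnerA]
    split
    · exact List.Sublist.refl _
    split
    · rw [pvStep_eq_erase]
      exact (ih _).trans (List.erase_sublist ..)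
    · exact ih copy

theorem pvInnerA_count_ne (v : Int) (sd copy : List Int) (u : Int) (h : u ≠ v) :
    (pvInnerA v copy sd).count u = copy.count u := by
  induction sd generalizing copy with
  | nil => rfl
  | cons l r ih =>
    simp only [pvInnerA]
    split
    · rfl
    split
    · rw [pvStep_eq_erase, ih, List.count_erase_of_ne h]
    · exact ih copy

theorem pvInnerA_count_self (v : Int) (sd copy : List Int) :
    (pvInnerA v copy sd).count v = copy.count v - min (copy.count v) (pvK v sd) := by
  induction sd generalizing copy with
  | nil => simp [pvInnerA, pvK]
  | cons l r ih =>
    by_cases h1 : l = v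
    · simp [pvInnerA, pvK, h1]
    by_cases h2 : PySem.Int.mod l v = 0
    · simp only [pvInnerA, pvK, if_neg h1, if_pos h2]
      rw [pvStep_eq_erase, ih, List.count_erase_self]
      omega
    · simp only [pvInnerA, pvK, if_neg h1, if_neg h2]
      rw [ih]
      omega

theorem pvK_pos_iff (v : Int) (sd : List Int) (hs : sd.Pairwise (fun a b => b ≤ a))
    (hv : v ∈ sd) :
    0 < pvK v sd ↔ ∃ y ∈ sd, v < y ∧ PySem.Int.mod y v = 0 := by
  induction sd with
  | nil => simp at hv
  | cons l r ih =>
    rw [List.pairwise_cons] at hs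
    by_cases h1 : l = v
    · subst h1
      have h0 : pvK l (l :: r) = 0 := by simp [pvK]
      rw [h0]
      constructor
      · intro h
        exact absurd h (lt_irrefl 0)
      · rintro ⟨y, hy, hlt, -⟩
        rcases List.mem_cons.1 hy with rfl | hy
        · omega
        · have := hs.1 y hy
          omega
    · have hvr : v ∈ r := by
        rcases List.mem_cons.1 hv with rfl | hv
        · exact absurd rfl h1
        · exact hv
      have hvl : v < l := lt_of_le_of_ne (hs.1 v hvr) (Ne.symm h1)
      simp only [pvK, if_neg h1]
      by_cases h2 : PySem.Int.mod l v = 0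
      · simp only [h2, if_true, ite_true]
        constructor
        · intro _
          exact ⟨l, List.mem_cons_self .., hvl, h2⟩
        · omega
      · simp only [h2, if_false, ite_false, Nat.zero_add]
        rw [ih hs.2 hvr]
        constructor
        · rintro ⟨y, hy, h⟩
          exact ⟨y, List.mem_cons_of_mem _ hy, h⟩
        · rintro ⟨y, hy, h⟩
          rcases List.mem_cons.1 hy with rfl | hy
          · exact absurd h.2 h2
          · exact ⟨y, hy, h⟩

theorem pvOuter_sublist (sd : List Int) (todo copy : List Int) :
    (todo.foldl (fun c n => pvInnerA n c sd) copy).Sublist copy := by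
  induction todo generalizing copy with
  | nil => exact List.Sublist.refl _
  | cons n rest ih =>
    exact (ih _).trans (pvInnerA_sublist n sd copy)

theorem pvOuter_count_eq (sd : List Int) (todo copy : List Int) (u : Int)
    (h : pvK u sd = 0 ∨ u ∉ todo) :
    (todo.foldl (fun c n => pvInnerA n c sd) copy).count u = copy.count u := by
  induction todo generalizing copy with
  | nil => rfl
  | cons n rest ih =>
    simp only [List.foldl_cons]
    rcases h with hk | hmem
    · rw [ih _ (Or.inl hk)]
      by_cases hun : u = n
      · subst hun
        rw [pvInnerA_count_self, hk]
        omega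
      · rw [pvInnerA_count_ne _ _ _ _ hun]
    · have hun : u ≠ n := fun e => hmem (e ▸ List.mem_cons_self ..)
      have hur : u ∉ rest := fun m => hmem (List.mem_cons_of_mem _ m)
      rw [ih _ (Or.inr hur), pvInnerA_count_ne _ _ _ _ hun]

theorem pvOuter_count_le (sd : List Int) (todo copy : List Int) (u : Int) :
    (todo.foldl (fun c n => pvInnerA n c sd) copy).count u
      ≤ copy.count u - min (copy.count u) (todo.count u * pvK u sd) := by
  induction todo generalizing copy with
  | nil => simp
  | cons n rest ih =>
    simp only [List.foldl_cons]
    by_cases hun : u = n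
    · subst hun
      have h1 := pvInnerA_count_self u sd copy
      have h2 := ih (pvInnerA u copy sd)
      rw [List.count_cons_self, Nat.succ_mul]
      set c := copy.count u with hc
      set K := pvK u sd with hK
      set R := rest.count u * K with hR
      omega
    · have h2 := ih (pvInnerA n copy sd)
      rw [pvInnerA_count_ne _ _ _ _ hun] at h2
      rw [List.count_cons_of_ne (Ne.symm hun)]
      exact h2

theorem pvSublist_count_filter (p : Int → Bool) (l l' : List Int)
    (hs : l'.Sublist l) (hc : ∀ v, l'.count v = if p v then l.count v else 0) :
    l' = l.filter p := by
  induction l generalizing l' with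
  | nil =>
    rw [List.sublist_nil.mp hs]
    rfl
  | cons x t ih =>
    by_cases hp : p x
    · cases hs with
      | cons _ hs' =>
        exfalso
        have hle := hs'.count_le x
        have := hc x
        simp only [hp, if_true, ite_true, List.count_cons_self] at this
        omega
      | cons₂ _ hs' =>
        rename_i t'
        rw [List.filter_cons_of_pos hp]
        congr 1
        refine ih t' hs' (fun v => ?_)
        have := hc v
        by_cases hvx : v = x
        · subst hvx
          simp only [hp, if_true, ite_true, List.count_cons_self] at this ⊢
          omega
        · rw [List.count_cons_of_ne (Ne.symm hvx), List.count_cons_of_ne (Ne.symm hvx)] at this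
          exact this
    · have hx0 : l'.count x = 0 := by
        have := hc x
        simpa [hp] using this
      cases hs with
      | cons _ hs' =>
        rw [List.filter_cons_of_neg (by simp [hp])]
        refine ih l' hs' (fun v => ?_)
        have := hc v
        by_cases hvx : v = x
        · subst hvx
          simp [hp, hx0]
        · rw [List.count_cons_of_ne (Ne.symm hvx)] at this
          exact this
      | cons₂ _ hs' =>
        exfalso
        simp [List.count_cons_self] at hx0
    
theorem pvA_eq_filter (list : List Int) :
    condenseDivisibleList list
      = list.filter (fun v => pvK v (PySem.List.sorted list (fun x => x) true) == 0) := by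
  have hmain : condenseDivisibleList list
      = list.foldl (fun c n => pvInnerA n c (PySem.List.sorted list (fun x => x) true)) list := rfl
  rw [hmain]
  set sd := PySem.List.sorted list (fun x => x) true with hsd
  refine pvSublist_count_filter _ _ _ (pvOuter_sublist sd list list) (fun v => ?_)
  by_cases hK : pvK v sd = 0
  · rw [pvOuter_count_eq sd list list v (Or.inl hK)]
    simp [hK]
  · have hple := pvOuter_count_le sd list list v
    have hsub := (pvOuter_sublist sd list list).count_le v
    have hbeq : (pvK v sd == 0) = false := by simpa using hK
    rw [hbeq, if_neg (by simp)]
    by_cases hv : v ∈ list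
    · have hpos : 0 < list.count v := List.count_pos_iff.2 hv
      have hcK : list.count v ≤ list.count v * pvK v sd :=
        Nat.le_mul_of_pos_right _ (Nat.pos_of_ne_zero hK)
      omega
    · have : list.count v = 0 := List.count_eq_zero.2 hv
      omega

-- ===== VERDICT (by name: the statement is the Claim_ definition above) =====
theorem condenseDivisibleList_spec : Claim_equal_condenseDivisibleList := by
  intro list _ hpre
  unfold Spec_condenseDivisibleList condenseDivisibleList_alt
  rw [pvA_eq_filter]
  set sd := PySem.List.sorted list (fun x => x) true with hsd
  refine List.filter_congr (fun x hx => ?_)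
  have hmem : x ∈ sd := (PySem.List.mem_sorted _ _ _ _).2 hx
  have hpair : sd.Pairwise (fun a b => b ≤ a) := PySem.List.sorted_pairwise_rev _ _
  have hiff := pvK_pos_iff x sd hpair hmem
  have hlist : (0 < pvK x sd) ↔ ∃ y ∈ list, x < y ∧ PySem.Int.mod y x = 0 := by
    rw [hiff]
    constructor
    · rintro ⟨y, hy, h⟩
      exact ⟨y, (PySem.List.mem_sorted _ _ _ _).1 hy, h⟩
    · rintro ⟨y, hy, h⟩
      exact ⟨y, (PySem.List.mem_sorted _ _ _ _).2 hy, h⟩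
  rw [Bool.eq_iff_iff]
  simp only [beq_iff_eq, Bool.not_eq_true', List.any_eq_false, Bool.and_eq_false_iff,
    decide_eq_false_iff_not, not_not, not_lt, PySem.Set.mem_ofList]
  rcases eq_or_ne x 0 with rfl | hx0
  · have hK : pvK 0 sd = 0 := by
      by_contra h
      obtain ⟨y, hy, hlt, -⟩ := hlist.1 (Nat.pos_of_ne_zero h)
      exact hpre ⟨hx, ⟨y, hy, hlt⟩⟩
    constructor
    · intro _ y hy
      simp
    · intro _
      exact hK
  · constructor
    · intro hK y hy
      by_cases h1 : x < y
      · by_cases h2 : PySem.Int.mod y x = 0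
        · exfalso
          have : 0 < pvK x sd := hlist.2 ⟨y, hy, h1, h2⟩
          omega
        · simp [h2]
      · simp [h1]
    · intro hall
      by_contra hK
      obtain ⟨y, hy, hlt, hm⟩ := hlist.1 (Nat.pos_of_ne_zero hK)
      have := hall y hy
      simp [hx0, hlt, hm] at this
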